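-- pv_equiv track=rewrite | github.com/Orderbi/ailearning_1 | day4_sql_generator_plus.py | check_sql_valid
-- ===== SOURCE A (Python) =====
-- def check_sql_valid(sql_content):
--     # 3.1 如果是None或者空字符串直接返回False
--     if not sql_content:
--         return False
--     # 3.2 如果传入的内容非空，才有走下一步：校验SQL是否包含关键字
--     # 定义SQL核心关键字，只有包含这些关键字，才认为是有效的SQL
--     sql_keywords = ["SELECT", "FROM", "WHERE", "INSERT", "UPDATE", "DELETE", "JOIN", "GROUP BY", "ORDER BY"]
--     # 把内容转成大写，避免大小写问题
--     sql_upper = sql_content.upper()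
--     # 检查否包含至少一个核心关键字：如果关键词列表很长，这种短路行为可以节省时间
--     for keyword in sql_keywords:
--         if keyword in sql_upper:
--             # 如果是合法的SQL则直接返回TRUE
--             return True
--     # 整个循环完，都没找到关键字，判定为无效SQL
--     return False
-- ===== SOURCE B (Python) =====
-- def check_sql_valid(sql_content):
--     if not sql_content:
--         return False
--     keywords = ("SELECT", "FROM", "WHERE", "INSERT", "UPDATE", "DELETE", "JOIN", "GROUP BY", "ORDER BY")
--     sql_upper = sql_content.upper()
--     # single left-to-right scan over positions: at each position test whether
--     # some keyword starts there (position-major instead of keyword-major)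
--     for i in range(len(sql_upper)):
--         for kw in keywords:
--             if sql_upper.startswith(kw, i):
--                 return True
--     return False
-- ===== Notes on version B (the rewrite author's own statement) =====
-- stated objective: alternative
-- what changed: Replaced A's keyword-major loop (nine independent substring scans with 'in') by a single position-major left-to-right scan that tests at each position whether any keyword starts there.
import Mathlib
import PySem

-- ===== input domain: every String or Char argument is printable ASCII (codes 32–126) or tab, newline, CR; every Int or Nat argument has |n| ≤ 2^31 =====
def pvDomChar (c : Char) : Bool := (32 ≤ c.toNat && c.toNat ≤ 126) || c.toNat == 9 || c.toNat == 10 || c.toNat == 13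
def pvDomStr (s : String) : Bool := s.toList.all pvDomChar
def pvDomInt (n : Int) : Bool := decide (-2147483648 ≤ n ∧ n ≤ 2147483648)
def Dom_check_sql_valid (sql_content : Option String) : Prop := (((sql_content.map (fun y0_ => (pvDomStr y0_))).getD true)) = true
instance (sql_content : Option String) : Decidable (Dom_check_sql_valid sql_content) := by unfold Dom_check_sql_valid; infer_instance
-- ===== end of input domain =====

-- B replaces A's keyword-major loop (nine 'in' substring scans) by one position-major
-- left-to-right scan testing at each position whether some keyword starts there (objective: alternative).

-- ===== PORT A =====
def pvKeywords : List (List Char) :=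
  ["SELECT".toList, "FROM".toList, "WHERE".toList, "INSERT".toList, "UPDATE".toList,
   "DELETE".toList, "JOIN".toList, "GROUP BY".toList, "ORDER BY".toList]

def check_sql_valid (sql_content : Option String) : Bool :=
  match sql_content with
  | none => false
  | some s =>
    if s.toList.isEmpty then false
    else
      -- sql_upper = sql_content.upper(); loop over keywords, early return on 'keyword in sql_upper'
      pvKeywords.any (fun kw => PySem.Chars.isIn kw (PySem.Chars.upper s.toList))

-- ===== PORT B =====
-- Source B's inner 'for kw in keywords: if sql_upper.startswith(kw, i)' at position i,
-- scanning positions left to right = structural recursion over the suffixes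
def pvScan (kws : List (List Char)) : List Char → Bool
  | [] => false
  | c :: t => kws.any (fun kw => kw.isPrefixOf (c :: t)) || pvScan kws t

def check_sql_valid_alt (sql_content : Option String) : Bool :=
  match sql_content with
  | none => false
  | some s =>
    if s.toList.isEmpty then false
    else pvScan pvKeywords (PySem.Chars.upper s.toList)

-- ===== PRECONDITION & SPEC =====
def Spec_check_sql_valid (sql_content : Option String) (out : Bool) : Prop := out = check_sql_valid_alt sql_content
instance (sql_content : Option String) (out : Bool) : Decidable (Spec_check_sql_valid sql_content out) := by unfold Spec_check_sql_valid; infer_instance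

-- ===== CLAIM (what is proved, stated in full; the proofs are below) =====
def Claim_equal_check_sql_valid : Prop := ∀ (sql_content : Option String), Dom_check_sql_valid sql_content → Spec_check_sql_valid sql_content (check_sql_valid sql_content)

-- ===== LEMMAS AND PROOFS =====

-- position-major scan finds a keyword iff some keyword is a substring (keywords nonempty)
theorem pvScan_eq_any_isIn (kws : List (List Char)) (hne : ∀ kw ∈ kws, kw ≠ [])
    (l : List Char) : pvScan kws l = kws.any (fun kw => PySem.Chars.isIn kw l) := by
  induction l with
  | nil =>
    simp only [pvScan]
    symm
    rw [List.any_eq_false]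
    intro kw hkw h
    exact hne kw hkw (List.eq_nil_of_infix_nil ((PySem.Chars.isIn_iff_infix kw []).mp h))
  | cons c t ih =>
    simp only [pvScan, ih]
    rw [Bool.eq_iff_iff]
    simp only [Bool.or_eq_true, List.any_eq_true, List.isPrefixOf_iff_prefix,
      PySem.Chars.isIn_iff_infix, List.infix_cons_iff]
    constructor
    · rintro (⟨kw, hkw, hp⟩ | ⟨kw, hkw, hi⟩)
      · exact ⟨kw, hkw, Or.inl hp⟩
      · exact ⟨kw, hkw, Or.inr hi⟩
    · rintro ⟨kw, hkw, hp | hi⟩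
      · exact Or.inl ⟨kw, hkw, hp⟩
      · exact Or.inr ⟨kw, hkw, hi⟩

-- ===== VERDICT (by name: the statement is the Claim_ definition above) =====
theorem check_sql_valid_spec : Claim_equal_check_sql_valid := by
  intro sql_content _
  unfold Spec_check_sql_valid check_sql_valid check_sql_valid_alt
  cases sql_content with
  | none => rfl
  | some s =>
    dsimp only
    by_cases h : s.toList.isEmpty
    · simp [h]
    · have hs := pvScan_eq_any_isIn pvKeywords (by decide)
      simp [h, hs]
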